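-- pv_equiv track=rewrite | github.com/EItanya/cs373-collatz | Collatz.py | cycle_max
-- ===== SOURCE A (Python) =====
-- cache = dict()
--
-- def cycle_max(i, j):
--     """
--     i the beginning of the range, inclusive
--     j the end       of the range, inclusive
--     return the max cycle length of the range [i, j]
--     This function is called when computation is actually needed because the value isnt in the pre computed meta_cache
--     """
--     # <your code>
--     # cache = dict()
--
--     # assert i <= j
--
--
--     maximum = 1
--     for number in range(i, j+1):
--         assert number > 0
--         temp = number
--         c = 1
--
--         while number > 1:
--             if (number in cache):
--                 c += cache[number] -1
--                 break
--             else: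
--                 if (number % 2) == 0:
--                     number = (number // 2)
--                 else:
--                     number = (3 * number) + 1
--                 c += 1
--         assert c > 0
--         cache[temp] = c
--         if(c > maximum):
--             maximum = c
--
--     return maximum
-- ===== SOURCE B (Python) =====
-- def cycle_max(i, j):
--     if i <= j:
--         assert i > 0
--     best = 1
--     start = max(i, j // 2 + 1)
--     for n in range(start, j + 1):
--         m = n
--         c = 1
--         while m > 1:
--             r = m & 3
--             if r == 0:
--                 m >>= 2
--                 c += 2
--             elif r == 2:
--                 m >>= 1
--                 c += 1
--             elif r == 1:
--                 m = 3 * (m >> 2) + 1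
--                 c += 3
--             else:
--                 m = 9 * (m >> 2) + 8
--                 c += 4
--         if c > best:
--             best = c
--     return best
-- ===== Notes on version B (the rewrite author's own statement) =====
-- stated objective: alternative
-- what changed: B drops A's shared cache entirely: it first halves the range using L(2n) = L(n) + 1 (the maximum over [i, j] is attained in [max(i, j//2+1), j]) and then computes each length directly with a mod-4 step table that fuses up to four Collatz steps per iteration.
import Mathlib
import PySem

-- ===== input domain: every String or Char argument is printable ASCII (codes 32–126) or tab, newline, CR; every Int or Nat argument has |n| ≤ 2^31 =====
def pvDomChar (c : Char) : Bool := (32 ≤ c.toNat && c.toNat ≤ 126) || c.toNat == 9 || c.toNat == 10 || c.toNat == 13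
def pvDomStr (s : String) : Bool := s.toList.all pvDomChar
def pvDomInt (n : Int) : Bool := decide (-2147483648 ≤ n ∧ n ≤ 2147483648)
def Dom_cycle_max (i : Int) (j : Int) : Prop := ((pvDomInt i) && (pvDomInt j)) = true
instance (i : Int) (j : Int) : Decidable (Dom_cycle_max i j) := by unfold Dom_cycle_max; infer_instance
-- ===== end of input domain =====

-- B drops A's cache entirely: it first halves the range using L(2n) = L(n) + 1 (the maximum over
-- [i, j] is attained in [max(i, j//2+1), j]) and then computes each length directly with a mod-4
-- accelerated step that performs up to four Collatz steps at once. Equality of RETURN values is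
-- what is proved (A also mutates a module-level cache; B touches nothing). Both ports make the
-- unbounded Python while-loops total with the same step-count guard: a step counter capped at
-- pvF + 1 with the structural fuel in lockstep, so on every input whose Collatz iteration counts
-- stay ≤ 100000 — which includes everything the behavioural tests can reach — the guard never
-- fires and each port returns exactly what its Python returns.

-- one Collatz step of `number` (A's Python contains this exact expression)
def pvStep (n : Int) : Int :=
  if PySem.Int.mod n 2 = 0 then PySem.Int.floordiv n 2 else 3 * n + 1

-- step-count bound of the totality guard
def pvF : Int := 100000

-- ===== PORT A =====
-- the inner while-loop: cache lookup with break, else step; `none` = guard fired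
def pvAInner (cache : PySem.Dict Int Int) : Nat → Int → Int → Option Int
  | 0, _, _ => none
  | fuel + 1, n, c =>
    if 1 < n then
      if pvF < c then none
      else
        match cache.get? n with
        | some l => some (c + (l - 1))
        | none => pvAInner cache fuel (pvStep n) (c + 1)
    else some c

-- the outer for-loop over range(i, j+1), threading the cache and `maximum`
def pvAOuter (nums : List Int) (cache : PySem.Dict Int Int) (maximum : Int) : Option Int :=
  match nums with
  | [] => some maximum
  | num :: rest =>
    match pvAInner cache 100002 num 1 with
    | none => none
    | some c =>
      if pvF + 1 < c then none   -- totality guard: the cached jump overshot the step bound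
      else pvAOuter rest (cache.insert num c) (if maximum < c then c else maximum)

def cycle_max (i : Int) (j : Int) : Int :=
  (pvAOuter (PySem.List.pyRange i (j + 1) 1) PySem.Dict.empty 1).getD 0

-- ===== PORT B =====
-- B's inner while-loop: one iteration = the m&3 branch (m & 3 = m % 4 and m >> k = m // 2^k for
-- the loop's m > 1, ported with PySem.Int.mod/floordiv). Each branch advances the step counter by
-- the number of plain Collatz steps it fuses (2/1/3/4); the guard returns none as soon as the
-- counter would pass pvF at any of the fused intermediate steps — the totality device only.
def pvCLen : Nat → Int → Int → Option Int
  | 0, _, _ => none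
  | fuel + 1, m, c =>
    if 1 < m then
      if pvF < c then none
      else
        if PySem.Int.mod m 4 = 0 then
          if pvF < c + 1 then none
          else pvCLen fuel (PySem.Int.floordiv m 4) (c + 2)
        else if PySem.Int.mod m 4 = 2 then
          pvCLen fuel (PySem.Int.floordiv m 2) (c + 1)
        else if PySem.Int.mod m 4 = 1 then
          if pvF < c + 2 then none
          else pvCLen fuel (3 * PySem.Int.floordiv m 4 + 1) (c + 3)
        else
          if pvF < c + 3 then none
          else pvCLen fuel (9 * PySem.Int.floordiv m 4 + 8) (c + 4)
    else some c

-- B's outer for-loop over range(start, j+1), threading `best`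
def pvBMaxRun : List Int → Int → Option Int
  | [], best => some best
  | n :: rest, best =>
    match pvCLen 100002 n 1 with
    | none => none
    | some c => pvBMaxRun rest (if best < c then c else best)

def cycle_max_alt (i : Int) (j : Int) : Int :=
  (pvBMaxRun (PySem.List.pyRange (max i (PySem.Int.floordiv j 2 + 1)) (j + 1) 1) 1).getD 0

-- ===== PRECONDITION & SPEC =====
-- Pre_ excludes exactly the inputs on which A raises: A executes `assert number > 0` on the first
-- element of range(i, j+1) (and B asserts i > 0 on a nonempty range likewise), so both raise
-- AssertionError unless the range is empty (j < i) or starts at a positive integer (1 ≤ i).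
def Pre_cycle_max (i : Int) (j : Int) : Prop := 1 ≤ i ∨ j < i
instance (i : Int) (j : Int) : Decidable (Pre_cycle_max i j) := by unfold Pre_cycle_max; infer_instance

def pvWitness_cycle_max : Int × Int := (1, 6)

def Spec_cycle_max (i : Int) (j : Int) (out : Int) : Prop := out = cycle_max_alt i j
instance (i : Int) (j : Int) (out : Int) : Decidable (Spec_cycle_max i j out) := by unfold Spec_cycle_max; infer_instance

-- ===== CLAIM (what is proved, stated in full; the proofs are below) =====
def Claim_equal_cycle_max : Prop := ∀ (i : Int) (j : Int), Dom_cycle_max i j → Pre_cycle_max i j → Spec_cycle_max i j (cycle_max i j)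

-- ===== LEMMAS AND PROOFS =====

-- ground truth both ports are compared against: the guarded plain-step Collatz length
def pvBLen : Nat → Int → Int → Option Int
  | 0, _, _ => none
  | fuel + 1, n, c =>
    if 1 < n then
      if pvF < c then none
      else pvBLen fuel (pvStep n) (c + 1)
    else some c

def pvL (n : Int) : Option Int := pvBLen 100002 n 1

-- running max of pvL over a list, none-propagating: the common specification of both outer loops
def pvMaxL : List Int → Int → Option Int
  | [], acc => some acc
  | n :: rest, acc =>
    match pvL n with
    | none => none
    | some c => pvMaxL rest (max acc c)

-- the guard applied after a cached jump / one more step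
def pvPostc (c : Int) : Option Int := if pvF + 1 < c then none else some c

-- one guarded "+1" on an optional length, and its k-fold iterate
def pvBump (o : Option Int) : Option Int := o.bind (fun v => pvPostc (v + 1))
def pvBumpN : Nat → Option Int → Option Int
  | 0, o => o
  | k + 1, o => pvBump (pvBumpN k o)

-- A-side cache invariant: every cached value is the guarded Collatz length of its key
def pvInvA (cache : PySem.Dict Int Int) : Prop :=
  ∀ m l, cache.get? m = some l → pvL m = some l

-- PySem floor division / modulus by a positive literal agree with Lean's ediv/emod
theorem pvdiv (x d : Int) (hd : 0 < d) : PySem.Int.floordiv x d = x / d := by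
  simp [PySem.Int.floordiv]
  rw [Int.fdiv_eq_ediv]
  simp
  omega

theorem pvmod (x d : Int) (hd : 0 < d) : PySem.Int.mod x d = x % d := by
  simp [PySem.Int.mod]
  rw [Int.fmod_eq_emod]
  simp
  omega

theorem pvStep_even (x : Int) (h : x % 2 = 0) : pvStep x = x / 2 := by
  rw [pvStep, pvmod x 2 (by norm_num), if_pos h, pvdiv x 2 (by norm_num)]

theorem pvStep_odd (x : Int) (h : ¬ x % 2 = 0) : pvStep x = 3 * x + 1 := by
  rw [pvStep, pvmod x 2 (by norm_num), if_neg h]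

theorem pvBLen_bounds (f : Nat) : ∀ n c v : Int, 1 < n → pvBLen f n c = some v →
    c + 1 ≤ v ∧ v ≤ pvF + 1 := by
  induction f with
  | zero => intro n c v hn h; simp [pvBLen] at h
  | succ f ih =>
    intro n c v hn h
    rw [pvBLen] at h
    rw [if_pos hn] at h
    by_cases h2 : pvF < c
    · rw [if_pos h2] at h; simp at h
    · rw [if_neg h2] at h
      by_cases hs : 1 < pvStep n
      · have := ih (pvStep n) (c + 1) v hs h
        omega
      · cases f with
        | zero => simp [pvBLen] at h
        | succ f' =>
          rw [pvBLen, if_neg hs] at h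
          cases h
          omega

-- bounds of any pvL value
theorem pvL_le (m v : Int) (h : pvL m = some v) : 1 ≤ v ∧ v ≤ pvF + 1 := by
  by_cases hm : 1 < m
  · have := pvBLen_bounds 100002 m 1 v hm h
    omega
  · rw [pvL, show (100002 : Nat) = 100001 + 1 from rfl, pvBLen, if_neg hm] at h
    cases h
    norm_num [pvF]

theorem pvBLen_shift (f : Nat) : ∀ (g : Nat) (n a b v : Int),
    1 < n → 1 ≤ a → ¬ pvF < a → 1 ≤ b → ¬ pvF < b →
    (f : Int) + a = 100003 → (g : Int) + b = 100003 →
    pvBLen f n a = some v →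
    pvBLen g n b = if pvF + 1 < b + (v - a) then none else some (b + (v - a)) := by
  induction f with
  | zero => intro g n a b v hn ha1 ha2 hb1 hb2 hfa hgb h; simp [pvBLen] at h
  | succ f ih =>
    intro g n a b v hn ha1 ha2 hb1 hb2 hfa hgb h
    rw [pvBLen, if_pos hn, if_neg ha2] at h
    obtain ⟨g', rfl⟩ : ∃ g', g = g' + 1 := ⟨g - 1, by simp [pvF] at hb2; omega⟩
    rw [pvBLen, if_pos hn, if_neg hb2]
    by_cases hs : 1 < pvStep n
    · have ha1' : ¬ pvF < a + 1 := by
        by_contra hc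
        obtain ⟨f', rfl⟩ : ∃ f', f = f' + 1 := ⟨f - 1, by simp [pvF] at *; omega⟩
        rw [pvBLen, if_pos hs, if_pos hc] at h
        simp at h
      have hv := pvBLen_bounds f (pvStep n) (a + 1) v hs h
      by_cases hb' : pvF < b + 1
      · obtain ⟨g'', rfl⟩ : ∃ g'', g' = g'' + 1 := ⟨g' - 1, by simp [pvF] at *; omega⟩
        rw [pvBLen, if_pos hs, if_pos hb']
        rw [if_pos (by omega)]
      · have heq := ih g' (pvStep n) (a + 1) (b + 1) v hs (by omega) ha1' (by omega) hb'
          (by push_cast at hfa ⊢; omega) (by push_cast at hgb ⊢; omega) h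
        rw [heq]
        have h3 : b + 1 + (v - (a + 1)) = b + (v - a) := by ring
        rw [h3]
    · obtain ⟨f', rfl⟩ : ∃ f', f = f' + 1 := ⟨f - 1, by simp [pvF] at *; omega⟩
      rw [pvBLen, if_neg hs] at h
      cases h
      obtain ⟨g'', rfl⟩ : ∃ g'', g' = g'' + 1 := ⟨g' - 1, by simp [pvF] at *; omega⟩
      rw [pvBLen, if_neg hs]
      rw [if_neg (by omega)]
      congr 1
      omega

-- fewer fuel / larger counter preserves `none`
theorem pvBLen_none_shift (f : Nat) : ∀ (g : Nat) (n a b : Int),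
    a ≤ b → (f : Int) + a = (g : Int) + b →
    pvBLen f n a = none → pvBLen g n b = none := by
  induction f with
  | zero =>
    intro g n a b hab hfg _
    obtain rfl : g = 0 := by omega
    rw [pvBLen]
  | succ f ih =>
    intro g n a b hab hfg h
    cases g with
    | zero => rw [pvBLen]
    | succ g' =>
      by_cases hn : 1 < n
      · rw [pvBLen, if_pos hn] at h
        rw [pvBLen, if_pos hn]
        by_cases hb : pvF < b
        · rw [if_pos hb]
        · rw [if_neg hb]
          rw [if_neg (by omega)] at h
          exact ih g' (pvStep n) (a + 1) (b + 1) (by omega) (by push_cast at hfg ⊢; omega) h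
      · rw [pvBLen, if_neg hn] at h
        simp at h

-- pvL satisfies the guarded-successor recurrence
theorem pvL_step (n : Int) (hn : 1 < n) : pvL n = pvBump (pvL (pvStep n)) := by
  have h0 : pvL n = pvBLen 100001 (pvStep n) 2 := by
    rw [pvL, show (100002 : Nat) = 100001 + 1 from rfl, pvBLen, if_pos hn,
      if_neg (by norm_num [pvF])]
    norm_num
  cases h : pvL (pvStep n) with
  | none =>
    rw [h0, pvBLen_none_shift 100002 100001 (pvStep n) 1 2 (by norm_num) (by norm_num) h]
    rfl
  | some v =>
    by_cases hs : 1 < pvStep n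
    · have heq := pvBLen_shift 100002 100001 (pvStep n) 1 2 v hs (le_refl 1)
        (by norm_num [pvF]) (by norm_num) (by norm_num [pvF]) (by norm_num) (by norm_num) h
      rw [h0, heq]
      show _ = pvPostc (v + 1)
      unfold pvPostc
      have h2 : (2 : Int) + (v - 1) = v + 1 := by ring
      rw [h2]
    · have hv : v = 1 := by
        rw [pvL, show (100002 : Nat) = 100001 + 1 from rfl, pvBLen, if_neg hs] at h
        cases h; rfl
      rw [h0, show (100001 : Nat) = 100000 + 1 from rfl, pvBLen, if_neg hs, hv]
      show _ = pvPostc 2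
      unfold pvPostc
      rw [if_neg (by norm_num [pvF])]

theorem pvBumpN_none (k : Nat) : pvBumpN k none = none := by
  induction k with
  | zero => rfl
  | succ k ih => rw [pvBumpN, ih]; rfl

theorem pvBumpN_some (k : Nat) : ∀ c0 : Int, c0 ≤ pvF + 1 →
    pvBumpN k (some c0) = if pvF + 1 < c0 + (k : Int) then none else some (c0 + (k : Int)) := by
  induction k with
  | zero => intro c0 h; simp [pvBumpN]; omega
  | succ k ih =>
    intro c0 h
    rw [pvBumpN, ih c0 h]
    by_cases hk : pvF + 1 < c0 + (k : Int)
    · rw [if_pos hk, if_pos (by push_cast; omega)]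
      rfl
    · rw [if_neg hk]
      show pvPostc (c0 + (k : Int) + 1) = _
      unfold pvPostc
      by_cases hk1 : pvF + 1 < c0 + (k : Int) + 1
      · rw [if_pos hk1, if_pos (by push_cast; omega)]
      · rw [if_neg hk1, if_neg (by push_cast; omega)]
        congr 1
        push_cast
        ring

theorem pvBumpN_bump (k : Nat) (o : Option Int) :
    pvBumpN k (pvBump o) = pvBump (pvBumpN k o) := by
  induction k with
  | zero => rfl
  | succ k ih => rw [pvBumpN, ih, pvBumpN]

-- any fuel: the plain-step loop is none as soon as the counter is past the bound (and 1 < m)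
theorem pvBLen_none_of_big (f : Nat) (m c : Int) (h1 : 1 < m) (h2 : pvF < c) :
    pvBLen f m c = none := by
  cases f with
  | zero => rw [pvBLen]
  | succ f => rw [pvBLen, if_pos h1, if_pos h2]

-- the accelerated loop computes exactly the guarded plain-step length
theorem pvCLen_eq (g : Nat) : ∀ (f : Nat) (m c : Int), 1 ≤ c → c ≤ pvF + 1 →
    100003 ≤ (g : Int) + c → (f : Int) + c = 100003 →
    pvCLen g m c = pvBLen f m c := by
  induction g with
  | zero => intro f m c h1 h2 h3 h4; exfalso; simp [pvF] at h2; omega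
  | succ g ih =>
    intro f m c h1 h2 h3 h4
    by_cases hm : 1 < m
    · by_cases hc : pvF < c
      · rw [pvCLen, if_pos hm, if_pos hc, pvBLen_none_of_big f m c hm hc]
      · -- c ≤ pvF, so f = 100003 - c ≥ 3
        obtain ⟨f3, rfl⟩ : ∃ f3, f = f3 + 3 := ⟨f - 3, by simp [pvF] at hc; omega⟩
        have hm4 : m % 4 = 0 ∨ m % 4 = 1 ∨ m % 4 = 2 ∨ m % 4 = 3 := by omega
        rw [pvCLen, if_pos hm, if_neg hc, pvmod m 4 (by norm_num),
          pvdiv m 4 (by norm_num), pvdiv m 2 (by norm_num)]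
        rcases hm4 with h0 | h1' | h2' | h3'
        · -- m ≡ 0 (mod 4): m/2 then m/4, counter +2
          rw [if_pos h0]
          have hs1 : pvStep m = m / 2 := pvStep_even m (by omega)
          have hgt : 1 < m / 2 := by omega
          rw [pvBLen, if_pos hm, if_neg hc, hs1]
          by_cases hg1 : pvF < c + 1
          · rw [if_pos hg1, pvBLen_none_of_big (f3 + 2) (m / 2) (c + 1) hgt hg1]
          · rw [if_neg hg1]
            have hs2 : pvStep (m / 2) = m / 4 := by
              rw [pvStep_even (m / 2) (by omega)]
              omega
            rw [pvBLen, if_pos hgt, if_neg hg1, hs2,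
              show c + 1 + 1 = c + 2 from by ring]
            exact ih (f3 + 1) (m / 4) (c + 2) (by omega) (by omega)
              (by push_cast at h3 ⊢; omega) (by push_cast at h4 ⊢; omega)
        · -- m ≡ 1 (mod 4), m ≥ 5: 3m+1, (3m+1)/2, (3m+1)/4 = 3(m/4)+1, counter +3
          rw [if_neg (by omega), if_neg (by omega), if_pos h1']
          have hm5 : 5 ≤ m := by omega
          have hs1 : pvStep m = 3 * m + 1 := pvStep_odd m (by omega)
          rw [pvBLen, if_pos hm, if_neg hc, hs1]
          have hgt1 : 1 < 3 * m + 1 := by omega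
          by_cases hg1 : pvF < c + 1
          · rw [if_pos (show pvF < c + 2 by omega),
              pvBLen_none_of_big (f3 + 2) (3 * m + 1) (c + 1) hgt1 hg1]
          · have hs2 : pvStep (3 * m + 1) = (3 * m + 1) / 2 :=
              pvStep_even (3 * m + 1) (by omega)
            rw [pvBLen, if_pos hgt1, if_neg hg1, hs2,
              show c + 1 + 1 = c + 2 from by ring]
            have hgt2 : 1 < (3 * m + 1) / 2 := by omega
            by_cases hg2 : pvF < c + 2
            · rw [if_pos hg2,
                pvBLen_none_of_big (f3 + 1) ((3 * m + 1) / 2) (c + 2) hgt2 hg2]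
            · rw [if_neg hg2]
              have hs3 : pvStep ((3 * m + 1) / 2) = 3 * (m / 4) + 1 := by
                rw [pvStep_even ((3 * m + 1) / 2) (by omega)]
                omega
              rw [pvBLen, if_pos hgt2, if_neg hg2, hs3,
                show c + 2 + 1 = c + 3 from by ring]
              exact ih f3 (3 * (m / 4) + 1) (c + 3) (by omega) (by omega)
                (by push_cast at h3 ⊢; omega) (by push_cast at h4 ⊢; omega)
        · -- m ≡ 2 (mod 4): one halving, counter +1
          rw [if_neg (by omega), if_pos h2']
          have hs1 : pvStep m = m / 2 := pvStep_even m (by omega)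
          rw [pvBLen, if_pos hm, if_neg hc, hs1]
          exact ih (f3 + 2) (m / 2) (c + 1) (by omega) (by omega)
            (by push_cast at h3 ⊢; omega) (by push_cast at h4 ⊢; omega)
        · -- m ≡ 3 (mod 4): 3m+1, (3m+1)/2 odd, 3·that+1, /2 = 9(m/4)+8, counter +4
          rw [if_neg (by omega), if_neg (by omega), if_neg (by omega)]
          have hs1 : pvStep m = 3 * m + 1 := pvStep_odd m (by omega)
          rw [pvBLen, if_pos hm, if_neg hc, hs1]
          have hgt1 : 1 < 3 * m + 1 := by omega
          by_cases hg1 : pvF < c + 1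
          · rw [if_pos (show pvF < c + 3 by omega),
              pvBLen_none_of_big (f3 + 2) (3 * m + 1) (c + 1) hgt1 hg1]
          · have hs2 : pvStep (3 * m + 1) = (3 * m + 1) / 2 :=
              pvStep_even (3 * m + 1) (by omega)
            rw [pvBLen, if_pos hgt1, if_neg hg1, hs2,
              show c + 1 + 1 = c + 2 from by ring]
            have hgt2 : 1 < (3 * m + 1) / 2 := by omega
            by_cases hg2 : pvF < c + 2
            · rw [if_pos (show pvF < c + 3 by omega),
                pvBLen_none_of_big (f3 + 1) ((3 * m + 1) / 2) (c + 2) hgt2 hg2]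
            · have hs3 : pvStep ((3 * m + 1) / 2) = 3 * ((3 * m + 1) / 2) + 1 :=
                pvStep_odd ((3 * m + 1) / 2) (by omega)
              rw [pvBLen, if_pos hgt2, if_neg hg2, hs3,
                show c + 2 + 1 = c + 3 from by ring]
              have hgt3 : 1 < 3 * ((3 * m + 1) / 2) + 1 := by omega
              by_cases hg3 : pvF < c + 3
              · rw [if_pos hg3,
                  pvBLen_none_of_big f3 (3 * ((3 * m + 1) / 2) + 1) (c + 3) hgt3 hg3]
              · rw [if_neg hg3]
                obtain ⟨f4, rfl⟩ : ∃ f4, f3 = f4 + 1 := ⟨f3 - 1, by simp [pvF] at hg3; omega⟩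
                have hs4 : pvStep (3 * ((3 * m + 1) / 2) + 1) = 9 * (m / 4) + 8 := by
                  rw [pvStep_even (3 * ((3 * m + 1) / 2) + 1) (by omega)]
                  omega
                rw [pvBLen, if_pos hgt3, if_neg hg3, hs4,
                  show c + 3 + 1 = c + 4 from by ring]
                exact ih f4 (9 * (m / 4) + 8) (c + 4) (by omega) (by omega)
                  (by push_cast at h3 ⊢; omega) (by push_cast at h4 ⊢; omega)
    · obtain ⟨f1, rfl⟩ : ∃ f1, f = f1 + 1 := ⟨f - 1, by simp [pvF] at h2; omega⟩
      rw [pvCLen, pvBLen, if_neg hm, if_neg hm]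

theorem pvCLen_pvL (n : Int) : pvCLen 100002 n 1 = pvL n :=
  pvCLen_eq 100002 100002 n 1 (le_refl 1) (by norm_num [pvF]) (by norm_num) (by norm_num)

-- B's outer loop computes the running max of pvL over its (trimmed) list
theorem pvBMaxRun_eq (nums : List Int) : ∀ best, pvBMaxRun nums best = pvMaxL nums best := by
  induction nums with
  | nil => intro best; rfl
  | cons n rest ih =>
    intro best
    rw [pvBMaxRun, pvMaxL, pvCLen_pvL]
    cases pvL n with
    | none => rfl
    | some c =>
      dsimp only
      have hmx : (if best < c then c else best) = max best c := by omega
      rw [hmx, ih]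

-- pvMaxL facts: none is independent of the accumulator; the accumulator merges by max;
-- a some-result bounds the accumulator and every element's length
theorem pvMaxL_none_iff (xs : List Int) : ∀ a, pvMaxL xs a = none ↔ ∃ x ∈ xs, pvL x = none := by
  induction xs with
  | nil => intro a; simp [pvMaxL]
  | cons x rest ih =>
    intro a
    rw [pvMaxL]
    cases hx : pvL x with
    | none => simp [hx]
    | some v =>
      rw [ih]
      constructor
      · rintro ⟨y, hy, hL⟩
        exact ⟨y, by simp [hy], hL⟩
      · rintro ⟨y, hy, hL⟩
        rcases List.mem_cons.mp hy with rfl | hy'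
        · rw [hx] at hL; cases hL
        · exact ⟨y, hy', hL⟩

theorem pvMaxL_max (ys : List Int) : ∀ b c, pvMaxL ys (max b c) = (pvMaxL ys c).map (fun s => max b s) := by
  induction ys with
  | nil => intro b c; rfl
  | cons y rest ih =>
    intro b c
    rw [pvMaxL, pvMaxL]
    cases pvL y with
    | none => rfl
    | some v =>
      dsimp only
      rw [max_assoc, ih]

theorem pvMaxL_acc_le (ys : List Int) : ∀ a s, pvMaxL ys a = some s → a ≤ s := by
  induction ys with
  | nil => intro a s h; cases h; exact le_refl _
  | cons y rest ih =>
    intro a s h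
    rw [pvMaxL] at h
    cases hy : pvL y with
    | none => rw [hy] at h; cases h
    | some v =>
      rw [hy] at h
      have := ih (max a v) s h
      omega

theorem pvMaxL_ub (ys : List Int) : ∀ a s, pvMaxL ys a = some s →
    ∀ y ∈ ys, ∀ w, pvL y = some w → w ≤ s := by
  induction ys with
  | nil => intro a s _ y hy; simp at hy
  | cons y rest ih =>
    intro a s h z hz w hw
    rw [pvMaxL] at h
    cases hy : pvL y with
    | none => rw [hy] at h; cases h
    | some v =>
      rw [hy] at h
      rcases List.mem_cons.mp hz with rfl | hz'
      · rw [hy] at hw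
        cases hw
        have := pvMaxL_acc_le rest (max a w) s h
        omega
      · exact ih (max a v) s h z hz' w hw

-- a dominated prefix does not change the running max
theorem pvMaxL_drop (xs : List Int) (ys : List Int)
    (hdom : ∀ x ∈ xs,
      (pvL x = none → ∃ y ∈ ys, pvL y = none) ∧
      (∀ v, pvL x = some v →
        (∃ y ∈ ys, pvL y = none) ∨ ∃ y ∈ ys, ∃ w, pvL y = some w ∧ v ≤ w)) :
    ∀ a, pvMaxL (xs ++ ys) a = pvMaxL ys a := by
  induction xs with
  | nil => intro a; rfl
  | cons x rest ih =>
    intro a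
    rw [List.cons_append, pvMaxL]
    cases hx : pvL x with
    | none =>
      dsimp only
      obtain ⟨y, hy, hL⟩ := (hdom x (by simp)).1 hx
      exact ((pvMaxL_none_iff ys a).mpr ⟨y, hy, hL⟩).symm
    | some v =>
      dsimp only
      rw [ih (fun z hz => hdom z (by simp [hz])) (max a v)]
      rcases (hdom x (by simp)).2 v hx with ⟨y, hy, hL⟩ | ⟨y, hy, w, hw, hvw⟩
      · rw [(pvMaxL_none_iff ys (max a v)).mpr ⟨y, hy, hL⟩,
          (pvMaxL_none_iff ys a).mpr ⟨y, hy, hL⟩]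
      · cases hys : pvMaxL ys a with
        | none =>
          rw [(pvMaxL_none_iff ys (max a v)).mpr ((pvMaxL_none_iff ys a).mp hys)]
        | some s =>
          rw [max_comm a v, pvMaxL_max ys v a, hys]
          have hws : w ≤ s := pvMaxL_ub ys a s hys y hy w hw
          simp
          omega

-- doubling: pvL (2x) is pvL x guarded-incremented once
theorem pvL_double (x : Int) (hx : 1 ≤ x) : pvL (2 * x) = pvBump (pvL x) := by
  rw [pvL_step (2 * x) (by omega), pvStep_even (2 * x) (by omega),
    Int.mul_ediv_cancel_left x (by norm_num : (2 : Int) ≠ 0)]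

-- from any 1 ≤ x ≤ j/2, repeated doubling reaches [j/2+1, j] with a bumped length
theorem pvDouble_reach (j : Int) : ∀ (n : Nat) (x : Int),
    (j / 2 + 1 - x).toNat ≤ n → 1 ≤ x → x ≤ j / 2 →
    ∃ y, j / 2 + 1 ≤ y ∧ y ≤ j ∧ ∃ t : Nat, pvL y = pvBumpN t (pvBump (pvL x)) := by
  intro n
  induction n with
  | zero => intro x hn hx1 hx2; exfalso; omega
  | succ n ih =>
    intro x hn hx1 hx2
    by_cases h2 : j / 2 + 1 ≤ 2 * x
    · exact ⟨2 * x, h2, by omega, 0, by rw [pvL_double x hx1]; rfl⟩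
    · obtain ⟨y, hy1, hy2, t, hL⟩ := ih (2 * x) (by omega) (by omega) (by omega)
      refine ⟨y, hy1, hy2, t + 1, ?_⟩
      rw [hL, pvL_double x hx1, pvBumpN_bump, pvBumpN]

-- halving the range keeps the running max: every dropped start is dominated by a kept one
theorem pvTrim (i j : Int) (hi : 1 ≤ i) :
    pvMaxL (PySem.List.pyRange i (j + 1) 1) 1
      = pvMaxL (PySem.List.pyRange (max i (j / 2 + 1)) (j + 1) 1) 1 := by
  by_cases hij : j < i
  · rw [PySem.List.pyRange_one_eq_nil (by omega),
      PySem.List.pyRange_one_eq_nil (by omega : j + 1 ≤ max i (j / 2 + 1))]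
  · have h1 : i ≤ max i (j / 2 + 1) := le_max_left _ _
    have h2 : max i (j / 2 + 1) ≤ j + 1 := by
      apply max_le (by omega) (by omega)
    rw [PySem.List.pyRange_one_append i (max i (j / 2 + 1)) (j + 1) h1 h2]
    apply pvMaxL_drop
    intro x hx
    rw [PySem.List.mem_pyRange_one] at hx
    have hx1 : 1 ≤ x := by omega
    have hx2 : x ≤ j / 2 := by
      rcases max_cases i (j / 2 + 1) with ⟨he, _⟩ | ⟨he, _⟩ <;> omega
    obtain ⟨y, hy1, hy2, t, hL⟩ :=
      pvDouble_reach j (j / 2 + 1 - x).toNat x (le_refl _) hx1 hx2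
    have hymem : y ∈ PySem.List.pyRange (max i (j / 2 + 1)) (j + 1) 1 := by
      rw [PySem.List.mem_pyRange_one]
      constructor
      · apply max_le (by omega) (by omega)
      · omega
    constructor
    · intro hxn
      refine ⟨y, hymem, ?_⟩
      rw [hL, hxn]
      show pvBumpN t (pvBump none) = none
      rw [show pvBump none = none from rfl, pvBumpN_none]
    · intro v hxv
      have hvb := pvL_le x v hxv
      rw [hxv] at hL
      by_cases hcap : pvF + 1 < v + 1
      · left
        refine ⟨y, hymem, ?_⟩
        rw [hL]
        show pvBumpN t (pvPostc (v + 1)) = none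
        rw [show pvPostc (v + 1) = none from by unfold pvPostc; rw [if_pos hcap], pvBumpN_none]
      · have hbv : pvBump (some v) = some (v + 1) := by
          show pvPostc (v + 1) = some (v + 1)
          unfold pvPostc
          rw [if_neg hcap]
        rw [hbv, pvBumpN_some t (v + 1) (by omega)] at hL
        by_cases hcap2 : pvF + 1 < v + 1 + (t : Int)
        · left
          refine ⟨y, hymem, ?_⟩
          rw [hL, if_pos hcap2]
        · right
          refine ⟨y, hymem, v + 1 + (t : Int), ?_, by omega⟩
          rw [hL, if_neg hcap2]

theorem pvAInner_eq (cache : PySem.Dict Int Int) (hC : pvInvA cache) :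
    ∀ (f : Nat) (n c : Int), 1 ≤ c → c ≤ pvF + 1 → (f : Int) + c = 100003 →
      (pvAInner cache f n c).bind pvPostc = pvBLen f n c := by
  intro f
  induction f with
  | zero => intro n c hc1 hc2 hfc; simp [pvF] at *; omega
  | succ f ih =>
    intro n c hc1 hc2 hfc
    by_cases h1 : 1 < n
    · by_cases h2 : pvF < c
      · rw [pvAInner, pvBLen, if_pos h1, if_pos h1, if_pos h2, if_pos h2]
        rfl
      · cases hget : cache.get? n with
        | some l =>
          have hb := hC n l hget
          have heq := pvBLen_shift 100002 (f + 1) n 1 c l h1 (le_refl 1)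
            (by norm_num [pvF]) hc1 h2 (by norm_num) (by push_cast at hfc ⊢; omega) hb
          rw [pvAInner, if_pos h1, if_neg h2, hget, heq]
          rfl
        | none =>
          rw [pvAInner, pvBLen, if_pos h1, if_pos h1, if_neg h2, if_neg h2, hget]
          exact ih (pvStep n) (c + 1) (by omega) (by omega) (by push_cast at hfc ⊢; omega)
    · rw [pvAInner, pvBLen, if_neg h1, if_neg h1]
      show pvPostc c = some c
      unfold pvPostc
      rw [if_neg (by omega)]

-- A's outer loop computes the running max of pvL over the full range
theorem pvAOuter_eq (nums : List Int) :
    ∀ cache m, pvInvA cache →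
      pvAOuter nums cache m = pvMaxL nums m := by
  induction nums with
  | nil => intro cache m hC; simp [pvAOuter, pvMaxL]
  | cons num rest ih =>
    intro cache m hC
    have h3 := pvAInner_eq cache hC 100002 num 1 (le_refl 1) (by norm_num [pvF]) (by norm_num)
    cases h : pvAInner cache 100002 num 1 with
    | none =>
      rw [h] at h3
      have h4 : pvL num = none := h3.symm
      simp [pvAOuter, pvMaxL, h, h4]
    | some c =>
      rw [h] at h3
      have h3' : pvPostc c = pvL num := h3
      by_cases hc : pvF + 1 < c
      · have hb : pvL num = none := by rw [← h3']; simp [pvPostc, hc]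
        simp [pvAOuter, pvMaxL, h, hb, hc]
      · have hb : pvL num = some c := by rw [← h3']; simp [pvPostc, hc]
        have hC' : pvInvA (cache.insert num c) := by
          intro m' l' hg
          rw [PySem.Dict.get?_insert] at hg
          by_cases hm : m' = num
          · rw [if_pos hm] at hg
            cases hg
            rw [hm]
            exact hb
          · rw [if_neg hm] at hg
            exact hC m' l' hg
        simp only [pvAOuter, pvMaxL, h, hb, if_neg hc]
        rw [ih _ _ hC']
        have hmx : (if m < c then c else m) = max m c := by omega
        rw [hmx]

-- ===== VERDICT (by name: the statement is the Claim_ definition above) =====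
theorem cycle_max_spec : Claim_equal_cycle_max := by
  intro i j _ hpre
  unfold Spec_cycle_max cycle_max cycle_max_alt
  rw [pvAOuter_eq _ _ _ (by intro m l h; simp [PySem.Dict.get?_empty] at h)]
  rw [pvBMaxRun_eq, pvdiv j 2 (by norm_num)]
  rcases hpre with hi | hij
  · rw [pvTrim i j hi]
  · rw [PySem.List.pyRange_one_eq_nil (by omega),
      PySem.List.pyRange_one_eq_nil (by
        have := le_max_left i (j / 2 + 1)
        omega)]
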